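-- pv_equiv track=rewrite | github.com/riddheshSajwan/miscellaneous | recursion/sixlets.py | solve
-- ===== SOURCE A (Python) =====
-- def solve(A, B):
--     n = len(A)
--     def _solve(_seq,_size,_sum,idx):
--         _res = 0
--         if _size == B:
--             return 1 if _sum <= 1000 else 0
--         for i in range(idx,n):
--             _res += _solve(_seq+[A[i]],_size+1,_sum+A[i],i+1)
--         return _res
--     return _solve([],0,0,0)
-- ===== SOURCE B (Python) =====
-- def solve(A, B):
--     def cnt(items, k, s):
--         if k == 0:
--             return 1 if s <= 1000 else 0
--         if not items:
--             return 0
--         return cnt(items[1:], k - 1, s + items[0]) + cnt(items[1:], k, s)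
--     return cnt(A, B, 0)
-- ===== Notes on version B (the rewrite author's own statement) =====
-- stated objective: simpler
-- what changed: Replaced A's index-range loop that rebuilds a growing _seq list at every call by a plain binary take/skip recursion on the list structure with no index, no range loop and no sequence accumulator.
import Mathlib
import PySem

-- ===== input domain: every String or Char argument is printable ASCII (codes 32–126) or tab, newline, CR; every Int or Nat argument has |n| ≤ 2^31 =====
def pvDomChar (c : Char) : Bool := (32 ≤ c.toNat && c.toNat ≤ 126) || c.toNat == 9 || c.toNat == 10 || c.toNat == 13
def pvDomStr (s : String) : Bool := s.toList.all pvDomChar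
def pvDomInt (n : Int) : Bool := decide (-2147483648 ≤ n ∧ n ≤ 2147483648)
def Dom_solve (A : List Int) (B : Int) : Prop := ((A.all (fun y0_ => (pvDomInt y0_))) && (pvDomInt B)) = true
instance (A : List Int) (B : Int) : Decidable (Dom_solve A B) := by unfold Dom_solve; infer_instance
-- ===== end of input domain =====

-- B replaces A's index-range loop (which also rebuilds a growing _seq list at every call)
-- by a plain binary take/skip recursion on the list structure; same return value everywhere.

-- ===== PORT A =====
-- _solve(_seq,_size,_sum,idx): the inner recursive helper of A (n = len(A) is passed explicitly).
def solveGoA (Arr : List Int) (B : Int) (n : Int) (seq : List Int) (size sum idx : Int) : Int :=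
  if size = B then (if sum ≤ 1000 then 1 else 0)
  else
    (PySem.List.pyRange idx n 1).attach.foldl
      (fun res i =>
        res + solveGoA Arr B n (seq ++ [PySem.List.pyGetD Arr i.val 0]) (size + 1)
                (sum + PySem.List.pyGetD Arr i.val 0) (i.val + 1)) 0
termination_by (n - idx).toNat
decreasing_by
  have h := (PySem.List.mem_pyRange_one).1 i.property
  omega

def solve (A : List Int) (B : Int) : Int :=
  solveGoA A B (A.length : Int) [] 0 0 0

-- ===== PORT B =====
-- cnt(items, k, s): binary take/skip recursion of Source B.
def cntB (items : List Int) (k s : Int) : Int :=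
  if k = 0 then (if s ≤ 1000 then 1 else 0)
  else
    match items with
    | [] => 0
    | a :: r => cntB r (k - 1) (s + a) + cntB r k s

def solve_alt (A : List Int) (B : Int) : Int := cntB A B 0

-- ===== PRECONDITION & SPEC =====
def Spec_solve (A : List Int) (B : Int) (out : Int) : Prop := out = solve_alt A B
instance (A : List Int) (B : Int) (out : Int) : Decidable (Spec_solve A B out) := by unfold Spec_solve; infer_instance

-- ===== CLAIM (what is proved, stated in full; the proofs are below) =====
def Claim_equal_solve : Prop := ∀ (A : List Int) (B : Int), Dom_solve A B → Spec_solve A B (solve A B)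

-- ===== LEMMAS AND PROOFS =====

lemma cntB_zero (l : List Int) (s : Int) : cntB l 0 s = if s ≤ 1000 then 1 else 0 := by
  rw [cntB.eq_def]; simp

lemma cntB_nil (k s : Int) (hk : k ≠ 0) : cntB [] k s = 0 := by
  rw [cntB.eq_def]; simp [hk]

lemma cntB_cons (a : Int) (r : List Int) (k s : Int) (hk : k ≠ 0) :
    cntB (a :: r) k s = cntB r (k - 1) (s + a) + cntB r k s := by
  rw [cntB.eq_def]; simp [hk]

-- Unrolling cntB along an index range: the sum of the "take element i" branches over all
-- remaining positions equals cntB on the remaining suffix (for k ≠ 0).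
lemma crux (l : List Int) : ∀ (Arr : List Int) (a : Int), 0 ≤ a → Arr.drop a.toNat = l →
    ∀ (k s : Int), k ≠ 0 →
    ((PySem.List.pyRange a (Arr.length : Int) 1).map
      (fun i => cntB (Arr.drop (i + 1).toNat) (k - 1) (s + PySem.List.pyGetD Arr i 0))).sum
      = cntB l k s := by
  induction l with
  | nil =>
    intro Arr a ha hd k s hk
    have hlen : Arr.length ≤ a.toNat := by
      have := congrArg List.length hd
      simp [List.length_drop] at this
      omega
    rw [PySem.List.pyRange_one_eq_nil (by omega)]
    simp [cntB_nil _ _ hk]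
  | cons x t ih =>
    intro Arr a ha hd k s hk
    have hlen : a.toNat < Arr.length := by
      have := congrArg List.length hd
      simp [List.length_drop] at this
      omega
    have hx : Arr[a.toNat] = x := by
      have h0 : (Arr.drop a.toNat)[0]'(by simp [hd]) = x := by simp [hd]
      simpa using h0
    have ht : Arr.drop ((a : Int) + 1).toNat = t := by
      have : ((a : Int) + 1).toNat = a.toNat + 1 := by omega
      rw [this]
      have := congrArg List.tail hd
      simpa [List.tail_drop] using this
    rw [PySem.List.pyRange_one_cons (by omega : a < (Arr.length : Int))]
    rw [List.map_cons, List.sum_cons]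
    rw [ih Arr (a + 1) (by omega) ht k s hk]
    rw [ht, PySem.List.pyGetD_eq_getElem (xs := Arr) (i := a) (d := 0) ha (by omega), hx]
    rw [cntB_cons _ _ _ _ hk]
lemma main (Arr : List Int) (B : Int) : ∀ (d : Nat) (seq : List Int) (size sum idx : Int),
    0 ≤ idx → ((Arr.length : Int) - idx).toNat ≤ d →
    solveGoA Arr B (Arr.length : Int) seq size sum idx = cntB (Arr.drop idx.toNat) (B - size) sum := by
  intro d
  induction d with
  | zero =>
    intro seq size sum idx h0 hle
    rw [solveGoA]
    by_cases hs : size = B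
    · subst hs
      rw [if_pos rfl, sub_self, cntB_zero]
    · have hk : B - size ≠ 0 := by omega
      have hnil : Arr.drop idx.toNat = [] := List.drop_eq_nil_of_le (by omega)
      rw [if_neg hs, PySem.List.pyRange_one_eq_nil (by omega), hnil, cntB_nil _ _ hk]
      simp
  | succ d ih =>
    intro seq size sum idx h0 hle
    rw [solveGoA]
    by_cases hs : size = B
    · subst hs
      rw [if_pos rfl, sub_self, cntB_zero]
    · simp only [if_neg hs]
      rw [List.foldl_attach
        (f := fun res i => res + solveGoA Arr B (Arr.length : Int) (seq ++ [PySem.List.pyGetD Arr i 0])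
          (size + 1) (sum + PySem.List.pyGetD Arr i 0) (i + 1))]
      have hk : B - size ≠ 0 := by omega
      rw [PySem.List.foldl_congr_mem _ _
        (fun res i => res + cntB (Arr.drop (i + 1).toNat) ((B - size) - 1) (sum + PySem.List.pyGetD Arr i 0)) _
        (by
          intro acc i hi
          have h := (PySem.List.mem_pyRange_one).1 hi
          rw [ih (seq ++ [PySem.List.pyGetD Arr i 0]) (size + 1) (sum + PySem.List.pyGetD Arr i 0) (i + 1)
            (by omega) (by omega)]
          have : B - (size + 1) = B - size - 1 := by ring
          rw [this])]
      rw [PySem.List.foldl_add _ (fun i => cntB (Arr.drop (i + 1).toNat) ((B - size) - 1) (sum + PySem.List.pyGetD Arr i 0))]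
      rw [crux (Arr.drop idx.toNat) Arr idx h0 rfl (B - size) sum hk]
      ring

-- ===== VERDICT (by name: the statement is the Claim_ definition above) =====
theorem solve_spec : Claim_equal_solve := by
  intro A B _
  unfold Spec_solve solve solve_alt
  rw [main A B ((A.length : Int)).toNat [] 0 0 0 le_rfl (by omega)]
  simp
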